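-- pv_equiv track=rewrite | github.com/Wenglar/advent-of-code-2023-public | day_08/camelmap_part2.py | get_multipliers
-- ===== SOURCE A (Python) =====
-- from typing import List, Set, Dict
--
-- def get_multipliers(denominators_list: List[List[int]]):
--     multipliers: List[int] = []
--     for dens1 in denominators_list:
--         while dens1:
--             d1 = dens1[0]
--             multipliers.append(d1)
--             for idx2, dens2 in enumerate(denominators_list):
--                 if d1 in dens2:
--                     denominators_list[idx2].remove(d1)
--     return multipliers
-- ===== SOURCE B (Python) =====
-- # Same return value as A in one ordered pass with per-value counters;
-- # A mutates its argument's inner lists (empties them), B leaves the input untouched — the return values agree.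
-- from typing import List
--
-- def get_multipliers(denominators_list: List[List[int]]):
--     emitted = {}          # value -> copies already appended (running max of per-list counts)
--     out: List[int] = []
--     for dens in denominators_list:
--         seen = {}         # value -> occurrences met so far in this list
--         for d in dens:
--             k = seen.get(d, 0)
--             seen[d] = k + 1
--             if k >= emitted.get(d, 0):
--                 out.append(d)
--                 emitted[d] = k + 1
--     return out
-- ===== Notes on version B (the rewrite author's own statement) =====
-- stated objective: faster
-- what changed: Replaces A's repeated in-place scans/removals across all lists (list.remove inside a while inside a for) by a single ordered pass keeping two hash counters (occurrences seen in the current list, copies already emitted), emitting an element exactly when its occurrence index reaches the emitted count.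
import Mathlib
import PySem

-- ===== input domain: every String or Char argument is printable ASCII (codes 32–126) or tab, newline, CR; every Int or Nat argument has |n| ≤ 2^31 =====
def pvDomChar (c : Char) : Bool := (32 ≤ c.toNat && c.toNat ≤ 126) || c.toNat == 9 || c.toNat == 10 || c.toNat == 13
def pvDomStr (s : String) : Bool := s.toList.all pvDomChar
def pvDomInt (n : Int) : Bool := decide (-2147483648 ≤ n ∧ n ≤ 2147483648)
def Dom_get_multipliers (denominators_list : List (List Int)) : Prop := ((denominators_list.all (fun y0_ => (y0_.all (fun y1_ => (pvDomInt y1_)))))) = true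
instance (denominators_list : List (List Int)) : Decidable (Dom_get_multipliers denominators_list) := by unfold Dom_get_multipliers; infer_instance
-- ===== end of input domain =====

-- ===== PORT A =====
-- B replaces A's quadratic scan-and-remove passes by one ordered pass with two counters;
-- Python A also empties the argument's inner lists in place — the equivalence proved here
-- is about the return value only (B does not mutate).

-- 'if d1 in dens2: denominators_list[idx2].remove(d1)' on one inner list
def pvRem1 (d : Int) (l : List Int) : List Int :=
  if l.contains d then (PySem.List.remove? l d).getD l else l

-- the inner 'for idx2, dens2 in enumerate(denominators_list): …' pass
def pvStepRemove (d : Int) (dl : List (List Int)) : List (List Int) :=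
  dl.map (pvRem1 d)

-- 'while dens1: d1 = dens1[0]; multipliers.append(d1); <inner for>' at index i;
-- returns (appended multipliers, state of denominators_list afterwards)
def pvWhileA (i : Nat) (dl : List (List Int)) : List Int × List (List Int) :=
  match h : dl[i]? with
  | some (d :: _) =>
      let r := pvWhileA i (pvStepRemove d dl)
      (d :: r.1, r.2)
  | _ => ([], dl)
termination_by ((dl[i]?).getD []).length
decreasing_by
  simp [pvStepRemove, List.getElem?_map, h, pvRem1]

-- the outer 'for dens1 in denominators_list' (len iterations; the outer list's length never changes)
def pvForA : Nat → Nat → List (List Int) → List Int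
  | 0, _, _ => []
  | n + 1, i, dl =>
      let r := pvWhileA i dl
      r.1 ++ pvForA n (i + 1) r.2

def get_multipliers (denominators_list : List (List Int)) : List Int :=
  pvForA denominators_list.length 0 denominators_list

-- ===== PORT B =====
def get_multipliers_alt (denominators_list : List (List Int)) : List Int :=
  (denominators_list.foldl
    (fun (st : PySem.Dict Int Int × List Int) dens =>
      let r := dens.foldl
        (fun (p : PySem.Dict Int Int × PySem.Dict Int Int × List Int) d =>
          let k := p.1.getD d 0
          let seen := p.1.insert d (k + 1)
          if k ≥ p.2.1.getD d 0 then
            (seen, p.2.1.insert d (k + 1), p.2.2 ++ [d])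
          else
            (seen, p.2.1, p.2.2))
        (PySem.Dict.empty, st.1, st.2)
      (r.2.1, r.2.2))
    (PySem.Dict.empty, [])).2

-- ===== PRECONDITION & SPEC =====
def Spec_get_multipliers (denominators_list : List (List Int)) (out : List Int) : Prop := out = get_multipliers_alt denominators_list
instance (denominators_list : List (List Int)) (out : List Int) : Decidable (Spec_get_multipliers denominators_list out) := by unfold Spec_get_multipliers; infer_instance

-- ===== CLAIM (what is proved, stated in full; the proofs are below) =====
def Claim_equal_get_multipliers : Prop := ∀ (denominators_list : List (List Int)), Dom_get_multipliers denominators_list → Spec_get_multipliers denominators_list (get_multipliers denominators_list)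

-- ===== LEMMAS AND PROOFS =====

-- Abstract model shared by both proofs: 'pvResid e l' drops the first (e x) occurrences of
-- each value x from l; 'pvModel e' emits the residual of each list and bumps e to the max.
def pvResid (e : Int → Int) : List Int → List Int
  | [] => []
  | d :: t =>
      if 0 < e d then pvResid (fun x => if x = d then e x - 1 else e x) t
      else d :: pvResid e t

def pvModel (e : Int → Int) : List (List Int) → List Int
  | [] => []
  | l :: ls => pvResid e l ++ pvModel (fun d => max (e d) ((l.count d : Int))) ls

theorem pvResid_congr (e e' : Int → Int) (h : ∀ x, max (e x) 0 = max (e' x) 0) :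
    ∀ m : List Int, pvResid e m = pvResid e' m := by
  intro m
  induction m generalizing e e' with
  | nil => rfl
  | cons d t ih =>
      have hd := h d
      by_cases hp : 0 < e d
      · have hp' : 0 < e' d := by omega
        simp only [pvResid, if_pos hp, if_pos hp']
        refine ih _ _ (fun x => ?_)
        by_cases hx : x = d
        · subst hx; simp; omega
        · simp only [if_neg hx]; exact h x

      · have hp' : ¬ 0 < e' d := by omega
        simp only [pvResid, if_neg hp, if_neg hp']
        rw [ih _ _ h]

theorem pvResid_zero (m : List Int) : pvResid (fun _ => (0 : Int)) m = m := by
  induction m with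
  | nil => rfl
  | cons d t ih => simp [pvResid, ih]

-- count of the residual, as an Int
theorem pvResid_count (l : List Int) (e : Int → Int) (he : ∀ x, 0 ≤ e x) (x : Int) :
    ((pvResid e l).count x : Int) = max 0 ((l.count x : Int) - e x) := by
  induction l generalizing e with
  | nil => simp [pvResid]; have := he x; omega
  | cons d t ih =>
      have hex := he x
      by_cases hp : 0 < e d
      · simp only [pvResid, if_pos hp]
        rw [ih _ (fun y => by have h1 := he y; have h2 := he d; by_cases hy : y = d <;> simp [hy] <;> omega)]
        by_cases hx : x = d
        · subst hx; simp only [List.count_cons_self]; push_cast; omega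
        · have hbd : (d == x) = false := by simp [Ne.symm hx]
          simp only [List.count_cons, hbd, if_neg hx]
          push_cast; omega
      · simp only [pvResid, if_neg hp]
        by_cases hx : x = d
        · subst hx
          simp only [List.count_cons_self]
          push_cast
          rw [ih e he]
          omega
        · have hbd : (d == x) = false := by simp [Ne.symm hx]
          simp only [List.count_cons, hbd]
          push_cast
          rw [ih e he]
          omega

-- removing one occurrence commutes with the residual (one more emission recorded)
theorem pvRem1_resid (d : Int) (m : List Int) (e : Int → Int) (he : ∀ x, 0 ≤ e x) :
    pvRem1 d (pvResid e m) = pvResid (fun x => if x = d then e x + 1 else e x) m := by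
  induction m generalizing e with
  | nil => simp [pvResid, pvRem1]
  | cons a t ih =>
      by_cases hp : 0 < e a
      · have hp' : 0 < (if a = d then e a + 1 else e a) := by split <;> omega
        simp only [pvResid, if_pos hp, if_pos hp']
        rw [ih _ (fun x => by have h1 := he x; have h2 := he a; by_cases hx : x = a <;> simp [hx] <;> omega)]
        refine pvResid_congr _ _ (fun x => ?_) t
        by_cases h1 : x = a
        · subst h1
          by_cases h2 : x = d <;> simp [h2]
        · by_cases h2 : x = d
          · subst h2; simp [h1]
          · simp [h1, h2]
      · by_cases had : a = d
        · subst had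
          have h0 : e a = 0 := le_antisymm (by omega) (he a)
          have hL : pvResid e (a :: t) = a :: pvResid e t := by
            rw [pvResid, if_neg hp]
          have hR : pvResid (fun x => if x = a then e x + 1 else e x) (a :: t)
              = pvResid e t := by
            rw [pvResid, if_pos (by rw [if_pos rfl]; omega)]
            have hfun : (fun x => if x = a then (if x = a then e x + 1 else e x) - 1
                  else (if x = a then e x + 1 else e x)) = e := by
              funext x; by_cases hx : x = a <;> simp [hx]
            rw [hfun]
          rw [hL, hR, pvRem1, if_pos (by simp), PySem.List.remove?_cons_self]
          simp
        · have hp' : ¬ 0 < (if a = d then e a + 1 else e a) := by rw [if_neg had]; omega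
          simp only [pvResid, if_neg hp, if_neg hp']
          have cons_step : ∀ r : List Int, pvRem1 d (a :: r) = a :: pvRem1 d r := by
            intro r
            by_cases hc : r.contains d
            · have hdr : d ∈ r := by simpa using hc
              have hrd : PySem.List.remove? r d = some (r.erase d) :=
                PySem.List.remove?_eq_some_erase r d hdr
              rw [pvRem1, if_pos (by simp; exact Or.inr hdr),
                  PySem.List.remove?_cons_of_ne _ had, hrd]
              simp [pvRem1, hrd]
            · have hda : ¬ d = a := fun h => had h.symm
              have hdnr : d ∉ r := by simpa using hc
              simp [pvRem1, hda, hdnr]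
          rw [cons_step, ih e he]

-- folding pvRem1 over an emitted sequence q
theorem pvRem1_fold (q : List Int) (m : List Int) (e : Int → Int) (he : ∀ x, 0 ≤ e x) :
    q.foldl (fun st d => pvRem1 d st) (pvResid e m)
      = pvResid (fun x => e x + (q.count x : Int)) m := by
  induction q generalizing e with
  | nil =>
      simp only [List.foldl_nil]
      refine pvResid_congr _ _ (fun x => by simp) m
  | cons d t ih =>
      simp only [List.foldl_cons]
      rw [pvRem1_resid d m e he,
          ih _ (fun x => by have h1 := he x; have h2 := he d; by_cases hx : x = d <;> simp [hx] <;> omega)]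
      refine pvResid_congr _ _ (fun x => ?_) m
      by_cases hx : x = d
      · subst hx; simp only [List.count_cons_self]; push_cast; omega
      · have hbd : (d == x) = false := by simp [Ne.symm hx]
        simp only [List.count_cons, hbd, if_neg hx]
        push_cast; omega

-- fold of whole-state removals, expressed per element of a mapped state
theorem pvFoldMap (q : List Int) (L : List (List Int)) (g : List Int → List Int) :
    q.foldl (fun st d => pvStepRemove d st) (L.map g)
      = L.map (fun m => q.foldl (fun x d => pvRem1 d x) (g m)) := by
  induction q generalizing g with
  | nil => simp
  | cons d t ih =>
      simp only [List.foldl_cons]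
      have : pvStepRemove d (L.map g) = L.map (fun m => pvRem1 d (g m)) := by
        simp [pvStepRemove, List.map_map]
      rw [this, ih]

-- characterisation of the while loop at index i
theorem pvWhileA_eq (i : Nat) (L : List Int) :
    ∀ dl : List (List Int), dl[i]? = some L →
      pvWhileA i dl = (L, L.foldl (fun st d => pvStepRemove d st) dl) := by
  induction L with
  | nil =>
      intro dl h
      rw [pvWhileA, h]
      rfl
  | cons d t ih =>
      intro dl h
      rw [pvWhileA, h]
      simp only
      have hstep : (pvStepRemove d dl)[i]? = some t := by
        simp [pvStepRemove, List.getElem?_map, h, pvRem1]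
      rw [ih _ hstep]
      rfl

-- main invariant for port A
theorem pvForA_model (ls : List (List Int)) :
    ∀ (e : Int → Int) (i : Nat) (dl : List (List Int)),
      (∀ x, 0 ≤ e x) → dl.drop i = ls.map (pvResid e) →
      pvForA ls.length i dl = pvModel e ls := by
  induction ls with
  | nil => intro e i dl _ _; rfl
  | cons l rest ih =>
      intro e i dl he hdrop
      have hidx : dl[i]? = some (pvResid e l) := by
        have h0 : (dl.drop i)[0]? = dl[i]? := by
          rw [List.getElem?_drop]
          norm_num
        rw [hdrop] at h0
        simpa using h0.symm
      simp only [List.length_cons, pvForA]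
      rw [pvWhileA_eq i (pvResid e l) dl hidx]
      simp only
      have hdrop' :
          ((pvResid e l).foldl (fun st d => pvStepRemove d st) dl).drop (i + 1)
            = rest.map (pvResid (fun x => max (e x) ((l.count x : Int)))) := by
        have hcomm : ∀ (q : List Int) (st : List (List Int)) (j : Nat),
            (q.foldl (fun st d => pvStepRemove d st) st).drop j
              = q.foldl (fun st d => pvStepRemove d st) (st.drop j) := by
          intro q
          induction q with
          | nil => intro st j; rfl
          | cons d t iht =>
              intro st j
              simp only [List.foldl_cons]
              rw [iht, pvStepRemove, ← List.map_drop]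
              rfl
        rw [hcomm _ _ (i + 1), ← List.tail_drop, hdrop]
        simp only [List.map_cons, List.tail_cons]
        rw [pvFoldMap]
        refine List.map_congr_left (fun m _ => ?_)
        rw [pvRem1_fold _ m e he]
        refine pvResid_congr _ _ (fun x => ?_) m
        have h1 := pvResid_count l e he x
        have h2 := he x
        show max (e x + ((pvResid e l).count x : Int)) 0
            = max (max (e x) ((l.count x : Int))) 0
        omega
      rw [ih (fun x => max (e x) ((l.count x : Int))) (i + 1) _
            (fun x => le_trans (he x) (le_max_left _ _)) hdrop']
      rfl

theorem portA_model (dl : List (List Int)) :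
    get_multipliers dl = pvModel (fun _ => 0) dl := by
  rw [get_multipliers]
  refine pvForA_model dl (fun _ => 0) 0 dl (fun _ => le_refl 0) ?_
  rw [List.drop_zero]
  calc dl = dl.map id := by simp
    _ = dl.map (pvResid fun _ => 0) :=
        List.map_congr_left (fun m _ => (pvResid_zero m).symm)

-- the inner-loop body of port B, named for the proofs
def pvInnerStep (p : PySem.Dict Int Int × PySem.Dict Int Int × List Int) (d : Int) :
    PySem.Dict Int Int × PySem.Dict Int Int × List Int :=
  let k := p.1.getD d 0
  let seen := p.1.insert d (k + 1)
  if k ≥ p.2.1.getD d 0 then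
    (seen, p.2.1.insert d (k + 1), p.2.2 ++ [d])
  else
    (seen, p.2.1, p.2.2)

theorem altB_eq (dl : List (List Int)) :
    get_multipliers_alt dl
      = (dl.foldl
          (fun (st : PySem.Dict Int Int × List Int) dens =>
            let r := dens.foldl pvInnerStep (PySem.Dict.empty, st.1, st.2)
            (r.2.1, r.2.2))
          (PySem.Dict.empty, [])).2 := rfl

-- inner-loop invariant for port B
theorem pvInnerB (dens : List Int) :
    ∀ (S E : PySem.Dict Int Int) (s e : Int → Int) (out : List Int),
      (∀ x, S.getD x 0 = s x) → (∀ x, E.getD x 0 = max (e x) (s x)) →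
      (∀ x, 0 ≤ s x) → (∀ x, 0 ≤ e x) →
      (dens.foldl pvInnerStep (S, E, out)).2.2
          = out ++ pvResid (fun x => e x - s x) dens
      ∧ ∀ x, ((dens.foldl pvInnerStep (S, E, out)).2.1).getD x 0
          = max (e x) (s x + (dens.count x : Int)) := by
  induction dens with
  | nil =>
      intro S E s e out hS hE hs he
      refine ⟨by simp [pvResid], fun x => by simp [hE x]⟩
  | cons d t ih =>
      intro S E s e out hS hE hs he
      simp only [List.foldl_cons]
      have hS' : ∀ x, (S.insert d (S.getD d 0 + 1)).getD x 0
          = if x = d then s x + 1 else s x := by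
        intro x
        rw [PySem.Dict.getD_insert]
        by_cases hx : x = d
        · rw [if_pos hx, if_pos hx, hS d, hx]
        · rw [if_neg hx, if_neg hx, hS x]
      have hs' : ∀ x, 0 ≤ (if x = d then s x + 1 else s x) := by
        intro x
        have := hs x
        split <;> omega
      have hcnt : ∀ x : Int, ((d :: t).count x : Int)
          = (t.count x : Int) + (if x = d then 1 else 0) := by
        intro x
        by_cases hx : x = d
        · subst hx; rw [List.count_cons_self, if_pos rfl]; push_cast; ring
        · have hbd : (d == x) = false := by simp [Ne.symm hx]
          rw [List.count_cons, hbd, if_neg hx]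
          simp
      by_cases hcond : e d ≤ s d
      · have hc : (S.getD d 0 ≥ E.getD d 0) := by rw [hS d, hE d]; omega
        have hstep : pvInnerStep (S, E, out) d
            = (S.insert d (S.getD d 0 + 1), E.insert d (S.getD d 0 + 1), out ++ [d]) := by
          simp only [pvInnerStep, ge_iff_le, if_pos hc]
        rw [hstep]
        have hE' : ∀ x, (E.insert d (S.getD d 0 + 1)).getD x 0
            = max (e x) (if x = d then s x + 1 else s x) := by
          intro x
          rw [PySem.Dict.getD_insert]
          by_cases hx : x = d
          · rw [if_pos hx, if_pos hx, hS d, hx]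
            have := hs d
            omega
          · rw [if_neg hx, if_neg hx, hE x]
        obtain ⟨h1, h2⟩ := ih (S.insert d (S.getD d 0 + 1)) (E.insert d (S.getD d 0 + 1))
          (fun x => if x = d then s x + 1 else s x) e (out ++ [d]) hS' hE' hs' he
        constructor
        · rw [h1]
          have hres : pvResid (fun x => e x - s x) (d :: t)
              = d :: pvResid (fun x => e x - (if x = d then s x + 1 else s x)) t := by
            rw [pvResid, if_neg (by omega)]
            congr 1
            refine pvResid_congr _ _ (fun x => ?_) t
            show max (e x - s x) 0 = max (e x - (if x = d then s x + 1 else s x)) 0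
            by_cases hx : x = d
            · rw [if_pos hx, hx]; omega
            · rw [if_neg hx]
          rw [hres, List.append_assoc, List.singleton_append]
        · intro x
          rw [h2 x]
          show max (e x) ((if x = d then s x + 1 else s x) + (t.count x : Int))
              = max (e x) (s x + ((d :: t).count x : Int))
          rw [hcnt x]
          by_cases hx : x = d
          · rw [if_pos hx, if_pos hx]; ring_nf
          · rw [if_neg hx, if_neg hx]; ring_nf
      · have hc : ¬ (S.getD d 0 ≥ E.getD d 0) := by rw [hS d, hE d]; omega
        have hstep : pvInnerStep (S, E, out) d
            = (S.insert d (S.getD d 0 + 1), E, out) := by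
          simp only [pvInnerStep, ge_iff_le, if_neg hc]
        rw [hstep]
        have hE' : ∀ x, E.getD x 0 = max (e x) (if x = d then s x + 1 else s x) := by
          intro x
          by_cases hx : x = d
          · rw [if_pos hx, hx, hE d]
            omega
          · rw [if_neg hx, hE x]
        obtain ⟨h1, h2⟩ := ih (S.insert d (S.getD d 0 + 1)) E
          (fun x => if x = d then s x + 1 else s x) e out hS' hE' hs' he
        constructor
        · rw [h1]
          have hres : pvResid (fun x => e x - s x) (d :: t)
              = pvResid (fun x => e x - (if x = d then s x + 1 else s x)) t := by
            rw [pvResid, if_pos (by omega)]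
            refine pvResid_congr _ _ (fun x => ?_) t
            show max ((if x = d then e x - s x - 1 else e x - s x)) 0
                = max (e x - (if x = d then s x + 1 else s x)) 0
            by_cases hx : x = d
            · rw [if_pos hx, if_pos hx]; ring_nf
            · rw [if_neg hx, if_neg hx]
          rw [hres]
        · intro x
          rw [h2 x]
          show max (e x) ((if x = d then s x + 1 else s x) + (t.count x : Int))
              = max (e x) (s x + ((d :: t).count x : Int))
          rw [hcnt x]
          by_cases hx : x = d
          · rw [if_pos hx, if_pos hx]; ring_nf
          · rw [if_neg hx, if_neg hx]; ring_nf

-- outer-loop invariant for port B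
theorem pvOuterB (ls : List (List Int)) :
    ∀ (E : PySem.Dict Int Int) (e : Int → Int) (out : List Int),
      (∀ x, E.getD x 0 = e x) → (∀ x, 0 ≤ e x) →
      (ls.foldl
        (fun (st : PySem.Dict Int Int × List Int) dens =>
          let r := dens.foldl pvInnerStep (PySem.Dict.empty, st.1, st.2)
          (r.2.1, r.2.2))
        (E, out)).2 = out ++ pvModel e ls := by
  induction ls with
  | nil => intro E e out _ _; simp [pvModel]
  | cons l rest ih =>
      intro E e out hE he
      simp only [List.foldl_cons]
      obtain ⟨h1, h2⟩ := pvInnerB l PySem.Dict.empty E (fun _ => 0) e out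
        (fun x => by simp [PySem.Dict.getD_empty])
        (fun x => by rw [hE x]; show e x = max (e x) 0; have := he x; omega)
        (fun _ => le_refl 0) he
      have hres : pvResid (fun x => e x - 0) l = pvResid e l :=
        pvResid_congr _ _ (fun x => by omega) l
      rw [ih _ (fun x => max (e x) ((l.count x : Int)))
            _ (fun x => by
                rw [h2 x]
                show max (e x) (0 + (l.count x : Int)) = max (e x) ((l.count x : Int))
                omega)
            (fun x => le_trans (he x) (le_max_left _ _))]
      rw [h1, hres, List.append_assoc]
      rfl

theorem portB_model (dl : List (List Int)) :
    get_multipliers_alt dl = pvModel (fun _ => 0) dl := by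
  rw [altB_eq]
  rw [pvOuterB dl PySem.Dict.empty (fun _ => 0) []
        (fun x => by simp [PySem.Dict.getD_empty]) (fun _ => le_refl 0)]
  simp

-- ===== VERDICT (by name: the statement is the Claim_ definition above) =====
theorem get_multipliers_spec : Claim_equal_get_multipliers := by
  intro dl _
  unfold Spec_get_multipliers
  rw [portA_model, portB_model]
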